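-- pv_equiv track=rewrite | github.com/alyssating/CS101-APTs | APT8/InterestingParty.py | bestInvitation
-- ===== SOURCE A (Python) =====
-- def bestInvitation(first, second):
--     """
--     return int based on string list
--     parameters first and second
--     """
--
--     lst = [first,second]
--     dict = {}
--     for x in lst:
--         for i in x:
--             if i not in dict:
--                 dict[i] = 0
--             dict[i] += 1
--     return sorted(dict.items(), key = lambda x: x[1], reverse = True)[0][1]
-- ===== SOURCE B (Python) =====
-- def bestInvitation(first, second):
--     combined = sorted(first + second)
--     best = 0
--     run = 0
--     prev = None
--     for x in combined:
--         if x == prev: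
--             run += 1
--         else:
--             run = 1
--             prev = x
--         if run > best:
--             best = run
--     return best
-- ===== Notes on version B (the rewrite author's own statement) =====
-- stated objective: alternative
-- what changed: Replaces A's dict-frequency pass plus sort-of-items with sort-then-scan: sort the concatenated list once and compute the longest run of equal adjacent elements in a single linear scan, maintaining no frequency table at all.
import Mathlib
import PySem

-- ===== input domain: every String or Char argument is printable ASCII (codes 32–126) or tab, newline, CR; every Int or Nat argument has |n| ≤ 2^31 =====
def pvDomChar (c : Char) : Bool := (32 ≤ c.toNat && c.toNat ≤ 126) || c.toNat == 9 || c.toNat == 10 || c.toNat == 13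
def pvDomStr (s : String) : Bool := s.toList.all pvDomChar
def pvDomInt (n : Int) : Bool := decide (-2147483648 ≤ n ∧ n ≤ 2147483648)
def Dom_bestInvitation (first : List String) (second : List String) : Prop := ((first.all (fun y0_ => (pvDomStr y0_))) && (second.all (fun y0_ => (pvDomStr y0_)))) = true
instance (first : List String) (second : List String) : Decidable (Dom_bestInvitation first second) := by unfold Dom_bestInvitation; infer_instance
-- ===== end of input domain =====

-- B replaces A's dict-counting pass with sort-then-scan (longest run of equal adjacent elements); equal value, no speed claim.

-- ===== PORT A =====
-- dict[i] = 0 when absent, then dict[i] += 1, over [first, second]; finally sorted(items, key=value, reverse)[0][1]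
def bestInvitation (first : List String) (second : List String) : Int :=
  let d := [first, second].foldl (fun d x =>
    x.foldl (fun d i =>
      let d1 := if d.contains i then d else d.insert i 0
      d1.insert i (d1.getD i 0 + 1)) d) PySem.Dict.empty
  (PySem.List.pyGetD (PySem.List.sorted d.items (fun p => p.2) true) 0 ("", 0)).2

-- ===== PORT B =====
-- loop body: if x == prev: run += 1 else: run = 1; prev = x; if run > best: best = run
def bStep (st : Int × Int × Option String) (x : String) : Int × Int × Option String :=
  let rp := if st.2.2 = some x then (st.2.1 + 1, st.2.2) else ((1 : Int), some x)
  ((if st.1 < rp.1 then rp.1 else st.1), rp.1, rp.2)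

def bestInvitation_alt (first : List String) (second : List String) : Int :=
  let combined := PySem.List.sorted (first ++ second) (fun x => x) false
  (combined.foldl bStep ((0 : Int), (0 : Int), (none : Option String))).1

-- ===== PRECONDITION & SPEC =====
-- A raises IndexError when both lists are empty; Pre_ excludes exactly that input.
def Pre_bestInvitation (first : List String) (second : List String) : Prop := first ++ second ≠ []
instance (first : List String) (second : List String) : Decidable (Pre_bestInvitation first second) := by unfold Pre_bestInvitation; infer_instance
def pvWitness_bestInvitation : List String × List String := (["a"], [])

def Spec_bestInvitation (first : List String) (second : List String) (out : Int) : Prop := out = bestInvitation_alt first second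
instance (first : List String) (second : List String) (out : Int) : Decidable (Spec_bestInvitation first second out) := by unfold Spec_bestInvitation; infer_instance

-- ===== CLAIM =====
def Claim_equal_bestInvitation : Prop := ∀ (first : List String) (second : List String), Dom_bestInvitation first second → Pre_bestInvitation first second → Spec_bestInvitation first second (bestInvitation first second)

-- ===== LEMMAS AND PROOFS =====

-- foldr-max accumulator used to characterise B's scan.
def Mx (l : List Int) (b : Int) : Int := l.foldr (fun a r => max a r) b

lemma Mx_nil (b : Int) : Mx [] b = b := rfl

lemma Mx_cons (a : Int) (l : List Int) (b : Int) : Mx (a :: l) b = max a (Mx l b) := rfl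

lemma le_Mx_base (l : List Int) (b : Int) : b ≤ Mx l b := by
  induction l with
  | nil => simp [Mx_nil]
  | cons a t ih => rw [Mx_cons]; omega

lemma le_Mx_mem (l : List Int) (b : Int) (a : Int) (h : a ∈ l) : a ≤ Mx l b := by
  induction l with
  | nil => simp at h
  | cons x t ih =>
    rw [Mx_cons]
    rcases List.mem_cons.mp h with h | h
    · omega
    · have := ih h; omega

lemma Mx_eq_base_or_mem (l : List Int) (b : Int) : Mx l b = b ∨ Mx l b ∈ l := by
  induction l with
  | nil => left; rfl
  | cons x t ih =>
    rw [Mx_cons]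
    rcases le_total x (Mx t b) with h2 | h2
    · rw [max_eq_right h2]
      rcases ih with h | h
      · exact Or.inl h
      · exact Or.inr (List.mem_cons.mpr (Or.inr h))
    · rw [max_eq_left h2]
      exact Or.inr List.mem_cons_self

lemma Mx_le_of (l : List Int) (b v : Int) (hb : b ≤ v) (h : ∀ a ∈ l, a ≤ v) : Mx l b ≤ v := by
  induction l with
  | nil => simpa [Mx_nil]
  | cons x t ih =>
    rw [Mx_cons]
    have hx := h x List.mem_cons_self
    have ht := ih (fun a ha => h a (List.mem_cons.mpr (Or.inr ha)))
    omega

lemma Mx_shift (l : List Int) (best c cnt : Int) (hc : 0 ≤ cnt)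
    (hmem : cnt = 0 ∨ (c + cnt) ∈ l) :
    Mx l (max best c) = max (c + cnt) (Mx l best) := by
  have h1 : Mx l (max best c) ≤ max (c + cnt) (Mx l best) := by
    refine Mx_le_of _ _ _ ?_ (fun a ha => le_trans (le_Mx_mem l best a ha) (le_max_right _ _))
    have hb := le_Mx_base l best
    omega
  have h2 : max (c + cnt) (Mx l best) ≤ Mx l (max best c) := by
    have hbase := le_Mx_base l (max best c)
    have hM : Mx l best ≤ Mx l (max best c) :=
      Mx_le_of _ _ _ (le_trans (le_max_left _ _) hbase)
        (fun a ha => le_Mx_mem l (max best c) a ha)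
    rcases hmem with h0 | hm
    · omega
    · have := le_Mx_mem l (max best c) _ hm
      omega
  omega

-- B's scan invariant on a sorted tail: best-so-far folded with the run counts.
lemma scan_inv (s : List String) (p : String) (best run : Int)
    (hs : s.Pairwise (· ≤ ·)) (hp : ∀ x ∈ s, p ≤ x) (hrb : run ≤ best) :
    (s.foldl bStep (best, run, some p)).1
      = Mx (s.map (fun k => (if k = p then run else 0) + ((s.count k : Nat) : Int))) best := by
  induction s generalizing p best run with
  | nil => simp [Mx_nil]
  | cons x t ih =>
    have hxt : ∀ y ∈ t, x ≤ y := (List.pairwise_cons.mp hs).1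
    have ht : t.Pairwise (· ≤ ·) := (List.pairwise_cons.mp hs).2
    have hpx : p ≤ x := hp x List.mem_cons_self
    by_cases hxp : x = p
    · -- run continues
      subst hxp
      have hstep : bStep (best, run, some x) x = (max best (run + 1), run + 1, some x) := by
        simp [bStep]; omega
      rw [List.foldl_cons, hstep,
        ih x (max best (run + 1)) (run + 1) ht hxt (le_max_right _ _)]
      have hfun : (fun k => (if k = x then run + 1 else 0) + ((t.count k : Nat) : Int))
          = fun k => (if k = x then run else 0) + (((x :: t).count k : Nat) : Int) := by
        funext k
        by_cases hk : k = x
        · subst hk; simp; ring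
        · simp [hk, Ne.symm hk]
      rw [hfun]
      rw [List.map_cons, Mx_cons]
      have hx0 : ((if x = x then run else 0) + (((x :: t).count x : Nat) : Int))
          = run + 1 + (t.count x : Int) := by simp; ring
      rw [hx0]
      refine Mx_shift _ best (run + 1) (t.count x : Int) (by positivity) ?_
      by_cases hxm : x ∈ t
      · refine Or.inr (List.mem_map.mpr ⟨x, hxm, ?_⟩)
        simp; ring
      · exact Or.inl (by simp [List.count_eq_zero.mpr hxm])
    · -- new run
      have hplt : p < x := lt_of_le_of_ne hpx (fun h => hxp h.symm)
      have hstep : bStep (best, run, some p) x = (max best 1, 1, some x) := by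
        have : ¬ (some p = some x) := by simp; exact fun h => hxp h.symm
        simp [bStep, this]; omega
      rw [List.foldl_cons, hstep, ih x (max best 1) 1 ht hxt (le_max_right _ _)]
      rw [List.map_cons, Mx_cons]
      have hx0 : ((if x = p then run else 0) + (((x :: t).count x : Nat) : Int))
          = 1 + (t.count x : Int) := by simp [hxp]; ring
      rw [hx0]
      have hmapeq : t.map (fun k => (if k = x then 1 else 0) + ((t.count k : Nat) : Int))
          = t.map (fun k => (if k = p then run else 0) + (((x :: t).count k : Nat) : Int)) := by
        refine List.map_congr_left (fun k hk => ?_)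
        have hkp : k ≠ p := by
          intro h
          have hlt := lt_of_lt_of_le hplt (hxt k hk)
          rw [h] at hlt
          exact lt_irrefl _ hlt
        by_cases hkx : k = x
        · subst hkx; simp [hkp]; ring
        · simp [hkp, hkx, Ne.symm hkx]
      rw [hmapeq]
      refine Mx_shift _ best 1 (t.count x : Int) (by positivity) ?_
      by_cases hxm : x ∈ t
      · refine Or.inr (List.mem_map.mpr ⟨x, hxm, ?_⟩)
        simp [hxp]; ring
      · exact Or.inl (by simp [List.count_eq_zero.mpr hxm])

-- B's value is THE maximum multiplicity of the sorted list.
lemma B_char (s : List String) (hs : s.Pairwise (· ≤ ·)) (x : String) (t : List String)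
    (hst : s = x :: t) :
    (∃ k ∈ s, (s.foldl bStep ((0:Int), (0:Int), (none : Option String))).1 = (s.count k : Int)) ∧
    (∀ k ∈ s, (s.count k : Int) ≤ (s.foldl bStep ((0:Int), (0:Int), (none : Option String))).1) := by
  subst hst
  have hxt : ∀ y ∈ t, x ≤ y := (List.pairwise_cons.mp hs).1
  have ht : t.Pairwise (· ≤ ·) := (List.pairwise_cons.mp hs).2
  have hstep : bStep ((0:Int), (0:Int), (none : Option String)) x = (1, 1, some x) := by
    simp [bStep]
  rw [List.foldl_cons, hstep, scan_inv t x 1 1 ht hxt le_rfl]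
  have hfun : (fun k => (if k = x then (1:Int) else 0) + ((t.count k : Nat) : Int))
      = fun k => (((x :: t).count k : Nat) : Int) := by
    funext k
    by_cases hk : k = x
    · subst hk; simp; ring
    · simp [hk, Ne.symm hk]
  rw [hfun]
  set v := Mx (t.map fun k => (((x :: t).count k : Nat) : Int)) 1 with hv
  have hbound : ∀ k ∈ x :: t, ((x :: t).count k : Int) ≤ v := by
    intro k hk
    rcases List.mem_cons.mp hk with hk1 | hk2
    · subst hk1
      by_cases hxm : k ∈ t
      · exact le_Mx_mem _ 1 _ (List.mem_map.mpr ⟨k, hxm, rfl⟩)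
      · have h0 : t.count k = 0 := List.count_eq_zero.mpr hxm
        have hc1 : (k :: t).count k = 1 := by simp [h0]
        rw [hc1]; exact le_Mx_base _ 1
    · exact le_Mx_mem _ 1 _ (List.mem_map.mpr ⟨k, hk2, rfl⟩)
  refine ⟨?_, hbound⟩
  rcases Mx_eq_base_or_mem (t.map fun k => (((x :: t).count k : Nat) : Int)) 1 with h | h
  · refine ⟨x, List.mem_cons_self, ?_⟩
    have hx := hbound x List.mem_cons_self
    have hc : (1 : Int) ≤ ((x :: t).count x : Int) := by
      have : 1 ≤ (x :: t).count x := List.one_le_count_iff.mpr List.mem_cons_self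
      exact_mod_cast this
    rw [← hv] at *
    omega
  · rcases List.mem_map.mp h with ⟨k, hk, hke⟩
    exact ⟨k, List.mem_cons.mpr (Or.inr hk), by rw [hv]; exact hke.symm⟩

-- A's loop body equals the canonical counter step.
lemma step_eq (d : PySem.Dict String Int) (i : String) :
    (let d1 := if d.contains i then d else d.insert i 0
     d1.insert i (d1.getD i 0 + 1)) = d.insert i (d.getD i 0 + 1) := by
  by_cases h : d.contains i = true
  · simp [h]
  · simp only [h, if_neg Bool.false_ne_true, PySem.Dict.insert_insert_self,
      PySem.Dict.getD_insert_self, PySem.Dict.getD_of_not_contains d (0 : Int) (by simp at h; exact h)]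

-- A's dict is Counter(first ++ second).
lemma dict_eq_counter (first second : List String) :
    [first, second].foldl (fun d x =>
      x.foldl (fun d i =>
        let d1 := if d.contains i then d else d.insert i 0
        d1.insert i (d1.getD i 0 + 1)) d) PySem.Dict.empty
    = PySem.Dict.counter (first ++ second) := by
  have h : (fun (d : PySem.Dict String Int) (i : String) =>
      let d1 := if d.contains i then d else d.insert i 0
      d1.insert i (d1.getD i 0 + 1))
      = fun (d : PySem.Dict String Int) (i : String) => d.insert i (d.getD i 0 + 1) := by
    funext d i; exact step_eq d i
  simp only [List.foldl, h]
  rw [← List.foldl_append, PySem.Dict.foldl_insert_getD_add_one_eq_counter]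

theorem bestInvitation_spec : Claim_equal_bestInvitation := by
  intro first second _ hpre
  have hne : first ++ second ≠ [] := hpre
  unfold Spec_bestInvitation bestInvitation bestInvitation_alt
  rw [dict_eq_counter]
  dsimp only
  simp only [PySem.Dict.items_counter]
  set comb := first ++ second with hcomb
  set S := PySem.Set.ofList comb with hS
  set itemsL := S.map (fun k => (k, (comb.count k : Int))) with hitems
  -- A side
  have hSne : S ≠ [] := by
    cases hc : comb with
    | nil => exact absurd hc hne
    | cons x xs =>
      intro h
      have : x ∈ S := by
        rw [hS, hc]; exact (PySem.Set.mem_ofList _ _).mpr List.mem_cons_self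
      simp [h] at this
  obtain ⟨m, t, h1⟩ : ∃ m t, PySem.List.sorted itemsL (fun p => p.2) true = m :: t := by
    cases hsi : PySem.List.sorted itemsL (fun p => p.2) true with
    | nil =>
      rw [PySem.List.sorted_eq_nil_iff] at hsi
      rw [hitems, List.map_eq_nil_iff] at hsi
      exact absurd hsi hSne
    | cons m t => exact ⟨m, t, rfl⟩
  rw [h1]
  have hget1 : PySem.List.pyGetD (m :: t) (0 : Int) ("", (0 : Int)) = m := by
    simp [PySem.List.pyGetD, PySem.List.pyGet?, PySem.List.pyIdx?]
  rw [hget1]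
  have hmA : m ∈ itemsL := by
    rw [← PySem.List.mem_sorted itemsL (fun p => p.2) true, h1]
    exact List.mem_cons_self
  have hAmax : ∀ y ∈ itemsL, y.2 ≤ m.2 :=
    PySem.List.key_head_sorted_rev_ge itemsL (fun p => p.2) h1
  have hAex : ∃ k ∈ comb, m.2 = (comb.count k : Int) := by
    rcases List.mem_map.mp hmA with ⟨k, hkS, hke⟩
    refine ⟨k, (PySem.Set.mem_ofList _ _).mp (hS ▸ hkS), ?_⟩
    rw [← hke]
  have hAbd : ∀ k ∈ comb, (comb.count k : Int) ≤ m.2 := by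
    intro k hk
    have hkS : k ∈ S := by rw [hS]; exact (PySem.Set.mem_ofList _ _).mpr hk
    exact hAmax (k, (comb.count k : Int)) (List.mem_map.mpr ⟨k, hkS, rfl⟩)
  -- B side
  set s := PySem.List.sorted comb (fun x => x) false with hsdef
  have hperm : s.Perm comb := PySem.List.sorted_perm comb (fun x => x) false
  have hsp : s.Pairwise (· ≤ ·) := by
    have := PySem.List.sorted_pairwise comb (fun x => x)
    simpa using this
  obtain ⟨x, tl, hst⟩ : ∃ x tl, s = x :: tl := by
    cases hc : s with
    | nil =>
      rw [hsdef, PySem.List.sorted_eq_nil_iff] at hc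
      exact absurd hc hne
    | cons x tl => exact ⟨x, tl, rfl⟩
  obtain ⟨⟨kb, hkb, hkbe⟩, hBbd⟩ := B_char s hsp x tl hst
  set v := (s.foldl bStep ((0:Int), (0:Int), (none : Option String))).1 with hvdef
  -- transfer counts along the permutation and conclude by antisymmetry
  have hcnt : ∀ k, s.count k = comb.count k := fun k => hperm.count_eq k
  have h1le : m.2 ≤ v := by
    rcases hAex with ⟨k, hk, hke⟩
    have hks : k ∈ s := hperm.mem_iff.mpr hk
    have := hBbd k hks
    rw [hcnt k] at this
    omega
  have h2le : v ≤ m.2 := by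
    have hkc : kb ∈ comb := hperm.mem_iff.mp hkb
    have := hAbd kb hkc
    rw [hkbe, hcnt kb]
    exact this
  omega
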